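-- pv_equiv track=rewrite | github.com/alonana/top | python/prime_pruning.py | lexical_delete
-- ===== SOURCE A (Python) =====
-- def lexical_delete(start, s, e):
--     if start > 999 or start >= len(s):
--         for i in range(e):
--             s.remove(min(s))
--         return s, 0
--
--     deleted = s[start:start + e + 1]
--
--     max_item = max(deleted)
--     max_index = deleted.index(max_item)
--
--     e = e - max_index
--     before = s[0:start]
--     after = s[start + max_index:]
--     s = before + after
--
--     return s, e
-- ===== SOURCE B (Python) =====
-- def lexical_delete(start, s, e):
--     if start > 999 or start >= len(s):
--         k = max(e, 0)
--         need = {}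
--         for v in sorted(s)[:k]:
--             need[v] = need.get(v, 0) + 1
--         out = []
--         for x in s:
--             if need.get(x, 0) > 0:
--                 need[x] = need.get(x, 0) - 1
--             else:
--                 out.append(x)
--         return out, 0
--
--     deleted = s[start:start + e + 1]
--     bi, bv = 0, deleted[0]
--     for i, v in enumerate(deleted):
--         if v > bv:
--             bi, bv = i, v
--     return s[:start] + s[start + bi:], e - bi
-- ===== Notes on version B (the rewrite author's own statement) =====
-- stated objective: faster
-- what changed: The remove-e-smallest branch replaces e repeated min()+list.remove() passes with one sort, a counter of the e smallest values, and a single rebuilding scan; the window branch replaces max()+.index() (two passes over the slice) with one first-argmax pass.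
import Mathlib
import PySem

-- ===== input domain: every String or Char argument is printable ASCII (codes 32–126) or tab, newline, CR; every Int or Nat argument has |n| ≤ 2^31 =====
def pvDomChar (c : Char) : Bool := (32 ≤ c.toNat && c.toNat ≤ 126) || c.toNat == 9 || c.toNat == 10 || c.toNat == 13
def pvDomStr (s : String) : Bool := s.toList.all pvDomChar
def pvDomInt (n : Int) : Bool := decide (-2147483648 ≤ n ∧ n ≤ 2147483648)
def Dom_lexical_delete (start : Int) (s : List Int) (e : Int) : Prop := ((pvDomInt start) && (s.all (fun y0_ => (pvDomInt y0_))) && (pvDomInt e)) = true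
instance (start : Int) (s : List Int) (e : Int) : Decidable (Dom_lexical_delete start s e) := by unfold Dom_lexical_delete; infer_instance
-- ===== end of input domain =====

-- B removes the e smallest via one sort + counter + single scan instead of A's e min()+remove() passes,
-- and finds the window's first maximum in one pass instead of max()+.index(); equivalence is about the
-- RETURN value only (Python A mutates s in place in its first branch, B does not).

-- ===== PORT A =====
-- body of A's loop 's.remove(min(s))'
def pvDel (t : List Int) : List Int :=
  match PySem.List.min? t (fun x => x) with
  | some m => (PySem.List.remove? t m).getD t   -- none unreachable under Pre_ (min([]) raises)
  | none => t

def lexical_delete (start : Int) (s : List Int) (e : Int) : List Int × Int :=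
  if start > 999 ∨ start ≥ (s.length : Int) then
    -- for i in range(e): s.remove(min(s))
    ((PySem.List.pyRange 0 e 1).foldl (fun t _ => pvDel t) s, 0)
  else
    let deleted := PySem.List.slice s (some start) (some (start + e + 1))
    match PySem.List.max? deleted (fun x => x) with
    | none => (s, e)    -- unreachable under Pre_ (max([]) raises)
    | some mx =>
      match PySem.List.index? deleted mx with
      | none => (s, e)  -- unreachable: mx ∈ deleted
      | some mi =>
        let before := PySem.List.slice s (some 0) (some start)
        let after := PySem.List.slice s (some (start + (mi : Int))) none
        (before ++ after, e - (mi : Int))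

-- ===== PORT B =====
-- body of B's rebuilding scan ('if need.get(x, 0) > 0: need[x] -= 1 else: out.append(x)')
def pvStep (st : PySem.Dict Int Int × List Int) (x : Int) : PySem.Dict Int Int × List Int :=
  if st.1.getD x 0 > 0 then (st.1.insert x (st.1.getD x 0 - 1), st.2)
  else (st.1, st.2 ++ [x])

def lexical_delete_alt (start : Int) (s : List Int) (e : Int) : List Int × Int :=
  if start > 999 ∨ start ≥ (s.length : Int) then
    let k := max e 0
    let need := (PySem.List.slice (PySem.List.sorted s (fun x => x) false) none (some k)).foldl
        (fun d v => d.insert v (d.getD v 0 + 1)) PySem.Dict.empty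
    let res := s.foldl pvStep (need, [])
    (res.2, 0)
  else
    let deleted := PySem.List.slice s (some start) (some (start + e + 1))
    match PySem.List.pyGet? deleted 0 with
    | none => (s, e)    -- unreachable under Pre_ (deleted[0] raises IndexError)
    | some d0 =>
      let r := (PySem.List.enumerate deleted 0).foldl
          (fun (p : Int × Int) iv => if iv.2 > p.2 then iv else p) ((0 : Int), d0)
      (PySem.List.slice s none (some start) ++ PySem.List.slice s (some (start + r.1)) none, e - r.1)

-- ===== PRECONDITION & SPEC =====
-- Pre_ excludes exactly the inputs where Python A raises: in the first branch e > len(s) makes the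
-- e-th min(s) hit an empty list (ValueError); in the window branch an empty slice s[start:start+e+1]
-- (e.g. e < 0, or a far-negative start) makes max([]) raise (ValueError).
def Pre_lexical_delete (start : Int) (s : List Int) (e : Int) : Prop :=
  if start > 999 ∨ start ≥ (s.length : Int) then e ≤ (s.length : Int)
  else PySem.List.slice s (some start) (some (start + e + 1)) ≠ []
instance (start : Int) (s : List Int) (e : Int) : Decidable (Pre_lexical_delete start s e) := by
  unfold Pre_lexical_delete; infer_instance
def pvWitness_lexical_delete : Int × List Int × Int := (1, [5, 3, 9, 2], 2)

def Spec_lexical_delete (start : Int) (s : List Int) (e : Int) (out : List Int × Int) : Prop := out = lexical_delete_alt start s e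
instance (start : Int) (s : List Int) (e : Int) (out : List Int × Int) : Decidable (Spec_lexical_delete start s e out) := by unfold Spec_lexical_delete; infer_instance

-- ===== CLAIM (what is proved, stated in full; the proofs are below) =====
def Claim_equal_lexical_delete : Prop := ∀ (start : Int) (s : List Int) (e : Int), Dom_lexical_delete start s e → Pre_lexical_delete start s e → Spec_lexical_delete start s e (lexical_delete start s e)

-- ===== LEMMAS AND PROOFS =====

theorem pv_foldl_const {α β : Type} (g : α → α) : ∀ (l : List β) (a : α),
    l.foldl (fun t _ => g t) a = g^[l.length] a := by
  intro l
  induction l with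
  | nil => intro a; rfl
  | cons x t ih =>
      intro a
      simp [List.foldl, ih, Function.iterate_succ_apply]

theorem pv_scan_ext : ∀ (l : List Int) (d₁ d₂ : PySem.Dict Int Int) (acc : List Int),
    (∀ x, d₁.getD x 0 = d₂.getD x 0) →
    (l.foldl pvStep (d₁, acc)).2 = (l.foldl pvStep (d₂, acc)).2 := by
  intro l
  induction l with
  | nil => intro d₁ d₂ acc h; rfl
  | cons x t ih =>
      intro d₁ d₂ acc h
      simp only [List.foldl, pvStep, h x]
      by_cases hx : d₂.getD x 0 > 0
      · simp only [hx, if_pos]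
        exact ih _ _ _ (by
          intro y
          by_cases hy : y = x
          · subst hy; simp [PySem.Dict.getD_insert, h y]
          · simp [PySem.Dict.getD_insert, hy, h y])
      · simp only [hx, if_neg, not_false_iff]
        exact ih _ _ _ h

theorem pv_scan_keep : ∀ (l : List Int) (d : PySem.Dict Int Int) (acc : List Int),
    (∀ x, d.getD x 0 = 0) → (l.foldl pvStep (d, acc)).2 = acc ++ l := by
  intro l
  induction l with
  | nil => intro d acc h; simp
  | cons x t ih =>
      intro d acc h
      simp only [List.foldl, pvStep, h x]
      norm_num
      rw [ih d (acc ++ [x]) h]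
      simp

theorem pv_scan_skip : ∀ (l : List Int) (m : Int) (d : PySem.Dict Int Int) (acc : List Int),
    m ∈ l → 1 ≤ d.getD m 0 →
    (l.foldl pvStep (d, acc)).2
      = ((l.erase m).foldl pvStep (d.insert m (d.getD m 0 - 1), acc)).2 := by
  intro l
  induction l with
  | nil => intro m d acc hm; exact absurd hm (List.not_mem_nil)
  | cons x t ih =>
      intro m d acc hm hd
      by_cases hxm : x = m
      · subst hxm
        rw [List.erase_cons_head]
        simp only [List.foldl, pvStep]
        rw [if_pos (by omega)]
      · rw [List.erase_cons_tail (by simpa using hxm)]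
        have hmt : m ∈ t := by
          rcases List.mem_cons.mp hm with h | h
          · exact absurd h.symm hxm
          · exact h
        have hmx : ¬ m = x := fun h => hxm h.symm
        simp only [List.foldl, pvStep]
        have hgx : (d.insert m (d.getD m 0 - 1)).getD x 0 = d.getD x 0 := by
          simp [PySem.Dict.getD_insert, hxm]
        rw [hgx]
        by_cases hx : d.getD x 0 > 0
        · simp only [hx, if_pos]
          rw [ih m (d.insert x (d.getD x 0 - 1)) acc hmt
            (by simp [PySem.Dict.getD_insert, hmx, hd])]
          apply pv_scan_ext
          intro y
          by_cases hy1 : y = x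
          · subst hy1
            simp [PySem.Dict.getD_insert, hxm]
          · by_cases hy2 : y = m
            · subst hy2
              simp [PySem.Dict.getD_insert, hy1, hmx]
            · simp [PySem.Dict.getD_insert, hy1, hy2]
        · simp only [hx, if_neg, not_false_iff]
          exact ih m d (acc ++ [x]) hmt hd

-- head of sorted(s) is the minimum value, and its tail is sorted(s.erase min).
theorem pv_sorted_cons (s : List Int) (m : Int) (t : List Int)
    (h : PySem.List.sorted s (fun x => x) false = m :: t) :
    (∀ y ∈ s, m ≤ y) ∧ m ∈ s ∧ PySem.List.sorted (s.erase m) (fun x => x) false = t := by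
  have hperm : (m :: t).Perm s := by
    rw [← h]; exact PySem.List.sorted_perm s (fun x => x) false
  have hmem : m ∈ s := hperm.mem_iff.mp (List.mem_cons_self)
  have hle : ∀ y ∈ s, m ≤ y := PySem.List.key_head_sorted_le s (fun x => x) h
  refine ⟨hle, hmem, ?_⟩
  have hpw : (m :: t).Pairwise (fun a b => a ≤ b) := by
    rw [← h]; exact PySem.List.sorted_pairwise s (fun x => x)
  have hperm2 : t.Perm (s.erase m) :=
    (hperm.trans (List.perm_cons_erase hmem)).cons_inv
  exact PySem.List.sorted_id_eq_of_perm_of_pairwise (s.erase m) t hperm2 (List.Pairwise.of_cons hpw)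

-- Main branch-1 invariant: n erase-min steps = counter scan with the n smallest values.
theorem pv_main : ∀ (n : Nat) (s : List Int), n ≤ s.length →
    pvDel^[n] s
      = (s.foldl pvStep
          (PySem.Dict.counter ((PySem.List.sorted s (fun x => x) false).take n), [])).2 := by
  intro n
  induction n with
  | zero =>
      intro s _
      simp only [Function.iterate_zero, id]
      rw [pv_scan_keep]
      · simp
      · intro x; simp [PySem.Dict.getD_counter]
  | succ n ih =>
      intro s hn
      have hs : s ≠ [] := by intro h; subst h; simp at hn
      obtain ⟨m, t, hsort⟩ : ∃ m t, PySem.List.sorted s (fun x => x) false = m :: t := by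
        cases h : PySem.List.sorted s (fun x => x) false with
        | nil => exact absurd ((PySem.List.sorted_eq_nil_iff s _ _).mp h) hs
        | cons a b => exact ⟨a, b, rfl⟩
      obtain ⟨hle, hmem, htail⟩ := pv_sorted_cons s m t hsort
      -- A's step removes the first occurrence of the min value m.
      have hdel : pvDel s = s.erase m := by
        unfold pvDel
        obtain ⟨mv, hmv⟩ : ∃ mv, PySem.List.min? s (fun x => x) = some mv := by
          cases h : PySem.List.min? s (fun x => x) with
          | none => exact absurd ((PySem.List.min?_eq_none_iff s _).mp h) hs
          | some a => exact ⟨a, rfl⟩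
        have hmvmem : mv ∈ s := PySem.List.min?_mem hmv
        have hmvmin : ∀ y ∈ s, mv ≤ y := PySem.List.min?_isMin hmv
        have : mv = m := le_antisymm (hmvmin m hmem) (hle mv hmvmem)
        subst this
        rw [hmv]
        show (PySem.List.remove? s mv).getD s = s.erase mv
        rw [PySem.List.remove?_eq_some_erase s mv hmvmem]
        rfl
      rw [Function.iterate_succ_apply, hdel,
        ih (s.erase m) (by
          have := List.length_erase_of_mem hmem
          omega),
        htail, hsort, List.take_succ_cons]
      -- counter (m :: take n t) pointwise equals (counter (take n t)).insert m (count+1-1 fix-up)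
      rw [pv_scan_skip s m _ [] hmem
        (by simp [PySem.Dict.getD_counter])]
      have herase : ((s.erase m).foldl pvStep
          ((PySem.Dict.counter (m :: t.take n)).insert m
            ((PySem.Dict.counter (m :: t.take n)).getD m 0 - 1), [])).2
          = ((s.erase m).foldl pvStep (PySem.Dict.counter (t.take n), [])).2 := by
        apply pv_scan_ext
        intro y
        by_cases hy : y = m
        · subst hy
          simp [PySem.Dict.getD_insert, PySem.Dict.getD_counter]
        · have hy' : ¬ m = y := fun h => hy h.symm
          simp [PySem.Dict.getD_insert, hy, PySem.Dict.getD_counter, hy']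
      rw [herase]

-- B's argmax fold returns (first index of the maximum, maximum value).
theorem pv_argmax (rest : List Int) (d0 : Int) :
    ∃ j : Nat,
      ((PySem.List.enumerate (d0 :: rest) 0).foldl
          (fun (p : Int × Int) iv => if iv.2 > p.2 then iv else p) ((0 : Int), d0)).2
        = rest.foldl max d0
      ∧ PySem.List.index? (d0 :: rest) (rest.foldl max d0) = some j
      ∧ ((PySem.List.enumerate (d0 :: rest) 0).foldl
          (fun (p : Int × Int) iv => if iv.2 > p.2 then iv else p) ((0 : Int), d0)).1 = (j : Int) := by
  induction rest using List.reverseRecOn with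
  | nil =>
      have hbase : PySem.List.enumerate [d0] 0 = [(0, d0)] := by
        simp [PySem.List.enumerate_eq_zipIdx_map]
      refine ⟨0, ?_, ?_, ?_⟩
      · rw [hbase]; simp
      · simp
      · rw [hbase]; simp
  | append_singleton t y ih =>
      obtain ⟨j, h1, h2, h3⟩ := ih
      have hcons : d0 :: (t ++ [y]) = (d0 :: t) ++ [y] := by simp
      have henum : PySem.List.enumerate (d0 :: (t ++ [y])) 0
          = PySem.List.enumerate (d0 :: t) 0 ++ [((0 + ((d0 :: t).length : Int)), y)] := by
        rw [hcons, PySem.List.enumerate_append]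
        rfl
      have hfold : (t ++ [y]).foldl max d0 = max (t.foldl max d0) y := by
        simp [List.foldl_append]
      set r := (PySem.List.enumerate (d0 :: t) 0).foldl
          (fun (p : Int × Int) iv => if iv.2 > p.2 then iv else p) ((0 : Int), d0) with hr
      have hstep : (PySem.List.enumerate (d0 :: (t ++ [y])) 0).foldl
          (fun (p : Int × Int) iv => if iv.2 > p.2 then iv else p) ((0 : Int), d0)
          = if y > r.2 then ((0 + ((d0 :: t).length : Int)), y) else r := by
        rw [henum, List.foldl_append]
        rfl
      have hmax := PySem.List.le_foldl_max t d0
      by_cases hgt : y > r.2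
      · refine ⟨(d0 :: t).length, ?_, ?_, ?_⟩
        · rw [hstep, if_pos hgt, hfold, h1] at *
          have : t.foldl max d0 < y := by rw [h1] at hgt; exact hgt
          simp [max_eq_right (le_of_lt this)]
        · have hy : y ∉ d0 :: t := by
            intro hmem
            have : y ≤ t.foldl max d0 := by
              rcases List.mem_cons.mp hmem with h | h
              · subst h; exact hmax.1
              · exact hmax.2 y h
            rw [h1] at hgt; omega
          rw [hfold]
          have : max (t.foldl max d0) y = y := by
            rw [h1] at hgt; exact max_eq_right (le_of_lt hgt)
          rw [this, hcons, PySem.List.index?_append_singleton_self (d0 :: t) y hy]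
        · rw [hstep, if_pos hgt]
          simp
      · refine ⟨j, ?_, ?_, ?_⟩
        · rw [hstep, if_neg hgt, hfold, h1]
          have : y ≤ t.foldl max d0 := by rw [h1] at hgt; omega
          rw [max_eq_left this]
        · have hmem : (t ++ [y]).foldl max d0 ∈ d0 :: t := by
            rw [hfold]
            have hy : y ≤ t.foldl max d0 := by rw [h1] at hgt; omega
            rw [max_eq_left hy, ← h1]
            exact (PySem.List.index?_isSome_iff _ _).mp (by rw [h1, h2]; rfl)
          rw [hcons, PySem.List.index?_append_of_mem [y] hmem, hfold]
          have hy : y ≤ t.foldl max d0 := by rw [h1] at hgt; omega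
          rw [max_eq_left hy, ← h1, h1, h2]
        · rw [hstep, if_neg hgt, h3]

-- ===== VERDICT (by name: the statement is the Claim_ definition above) =====
theorem lexical_delete_spec : Claim_equal_lexical_delete := by
  intro start s e _ hpre
  unfold Spec_lexical_delete lexical_delete lexical_delete_alt
  unfold Pre_lexical_delete at hpre
  by_cases hbr : start > 999 ∨ start ≥ (s.length : Int)
  · rw [if_pos hbr, if_pos hbr]
    rw [if_pos hbr] at hpre
    have hlen : (PySem.List.pyRange 0 e 1).length = e.toNat := by simp [pysem]
    have hk : PySem.List.slice (PySem.List.sorted s (fun x => x) false) none (some (max e 0))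
        = (PySem.List.sorted s (fun x => x) false).take e.toNat := by
      rw [PySem.List.slice_to _ (le_max_right e 0)]
      congr 1
      omega
    rw [pv_foldl_const pvDel, hlen]
    simp only [hk, PySem.Dict.foldl_insert_getD_add_one_eq_counter]
    rw [pv_main e.toNat s (by omega)]
  · rw [if_neg hbr, if_neg hbr]
    rw [if_neg hbr] at hpre
    simp only []
    cases hdel : PySem.List.slice s (some start) (some (start + e + 1)) with
    | nil => exact absurd hdel hpre
    | cons d0 rest =>
        have hget : PySem.List.pyGet? (d0 :: rest) 0 = some d0 := by simp [pysem]
        rw [hget, PySem.List.max?_id_cons]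
        obtain ⟨j, h1, h2, h3⟩ := pv_argmax rest d0
        simp only [h2, h3, PySem.List.slice_zero_start]
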